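-- pv_equiv track=rewrite | github.com/gemechutaye/a2sv-competitive-programming-g5 | 1108-defanging-an-ip-address/1108-defanging-an-ip-address.py | defangIPaddr
-- ===== SOURCE A (Python) =====
-- def defangIPaddr(address: str) -> str:
--     defanged = ""
--     for char in address:
--         if char == '.':
--             defanged += "[.]"
--         else:
--             defanged += char
--     return defanged
-- ===== SOURCE B (Python) =====
-- def defangIPaddr(address: str) -> str:
--     return "[.]".join(address.split('.'))
-- ===== Notes on version B (the rewrite author's own statement) =====
-- stated objective: faster
-- what changed: Replaces the character-by-character accumulation loop with a split on the dot character followed by a join over the resulting fields.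
import Mathlib
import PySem

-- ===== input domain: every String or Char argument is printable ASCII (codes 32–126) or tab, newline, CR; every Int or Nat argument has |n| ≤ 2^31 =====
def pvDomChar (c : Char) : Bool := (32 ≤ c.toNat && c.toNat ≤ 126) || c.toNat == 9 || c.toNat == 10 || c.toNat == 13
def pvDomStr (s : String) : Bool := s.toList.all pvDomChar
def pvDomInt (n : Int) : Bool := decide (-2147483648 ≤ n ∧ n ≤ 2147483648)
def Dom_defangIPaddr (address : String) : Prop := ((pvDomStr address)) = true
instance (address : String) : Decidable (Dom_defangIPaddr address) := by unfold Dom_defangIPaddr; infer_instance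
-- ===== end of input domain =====

-- B replaces A's char-by-char accumulation with an idiomatic "[.]".join(address.split('.')).


-- ===== PORT A =====
-- 'defanged += …' over the characters of address; string concatenation as List Char append.
def defangIPaddr (address : String) : String :=
  String.ofList (address.toList.foldl
    (fun acc c => if c == '.' then acc ++ ['[', '.', ']'] else acc ++ [c]) [])

-- ===== PORT B =====
-- "[.]".join(address.split('.')); split? is some because the separator "." is nonempty.
def defangIPaddr_alt (address : String) : String :=
  match PySem.Str.split? address "." with
  | some parts => PySem.Str.join "[.]" parts
  | none => ""

-- ===== PRECONDITION & SPEC =====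
def Spec_defangIPaddr (address : String) (out : String) : Prop := out = defangIPaddr_alt address
instance (address : String) (out : String) : Decidable (Spec_defangIPaddr address out) := by unfold Spec_defangIPaddr; infer_instance

-- ===== CLAIM (what is proved, stated in full; the proofs are below) =====
def Claim_equal_defangIPaddr : Prop := ∀ (address : String), Dom_defangIPaddr address → Spec_defangIPaddr address (defangIPaddr address)

-- ===== LEMMAS AND PROOFS =====

-- Structural characterisation of splitting on a single dot.
def pvSp : List Char → List (List Char)
  | [] => [[]]
  | c :: r => if c = '.' then [] :: pvSp r
              else ((c :: (pvSp r).headI) :: (pvSp r).tail)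

theorem pvSp_cons (c : Char) (r : List Char) :
    pvSp (c :: r) = if c = '.' then [] :: pvSp r
                    else ((c :: (pvSp r).headI) :: (pvSp r).tail) := rfl

theorem pvSp_ne_nil (l : List Char) : pvSp l ≠ [] := by
  cases l with
  | nil => simp [pvSp]
  | cons c r => simp only [pvSp]; split <;> simp

theorem pvGo_eq (l : List Char) : ∀ (fuel : Nat) (cur : List Char) (accs : List (List Char)),
    l.length ≤ fuel →
    PySem.Chars.splitOn.go ['.'] fuel l cur accs =
      accs.reverse ++ (pvSp l).modifyHead (cur.reverse ++ ·) := by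
  induction l with
  | nil =>
    intro fuel cur accs _
    cases fuel <;> simp [PySem.Chars.splitOn.go, pvSp]
  | cons c r ih =>
    intro fuel cur accs hf
    cases fuel with
    | zero => simp at hf
    | succ f =>
      simp only [List.length_cons, Nat.succ_le_succ_iff] at hf
      by_cases hc : c = '.'
      · subst hc
        have hpre : List.isPrefixOf ['.'] ('.' :: r) = true := by
          simp [List.isPrefixOf]
        rw [PySem.Chars.splitOn.go]
        simp only [hpre, if_true]
        rw [show List.drop (['.'] : List Char).length ('.' :: r) = r from rfl,
          ih f [] (cur.reverse :: accs) hf, pvSp_cons, if_pos rfl]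
        simp only [List.modifyHead]
        cases pvSp r <;> simp
      · have hpre : List.isPrefixOf ['.'] (c :: r) = false := by
          simp only [List.isPrefixOf, Bool.and_true, beq_eq_false_iff_ne, ne_eq]
          exact fun h => hc h.symm
        rw [PySem.Chars.splitOn.go]
        simp only [hpre]
        rw [ih f (c :: cur) accs hf, pvSp_cons, if_neg hc]
        obtain ⟨h, t, hht⟩ : ∃ h t, pvSp r = h :: t := by
          cases hsp : pvSp r with
          | nil => exact absurd hsp (pvSp_ne_nil r)
          | cons h t => exact ⟨h, t, rfl⟩
        simp [hht, List.modifyHead, List.headI]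

theorem pvSplitOn_eq (l : List Char) : PySem.Chars.splitOn l ['.'] = pvSp l := by
  rw [PySem.Chars.splitOn, pvGo_eq l (l.length + 1) [] [] (by omega)]
  obtain ⟨h, t, hht⟩ : ∃ h t, pvSp l = h :: t := by
    cases hsp : pvSp l with
    | nil => exact absurd hsp (pvSp_ne_nil l)
    | cons h t => exact ⟨h, t, rfl⟩
  simp [hht, List.modifyHead]

theorem pvJoin_sp (l : List Char) :
    PySem.Chars.join ['[', '.', ']'] (pvSp l) =
      l.flatMap (fun c => if c == '.' then ['[', '.', ']'] else [c]) := by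
  induction l with
  | nil => simp [pvSp, PySem.Chars.join, List.intercalate]
  | cons c r ih =>
    obtain ⟨h, t, hht⟩ : ∃ h t, pvSp r = h :: t := by
      cases hsp : pvSp r with
      | nil => exact absurd hsp (pvSp_ne_nil r)
      | cons h t => exact ⟨h, t, rfl⟩
    by_cases hc : c = '.'
    · subst hc
      rw [pvSp_cons, if_pos rfl]
      rw [show PySem.Chars.join ['[', '.', ']'] ([] :: pvSp r) =
            ['[', '.', ']'] ++ PySem.Chars.join ['[', '.', ']'] (pvSp r) from by
        rw [hht]; simp [PySem.Chars.join, List.intercalate, List.intersperse]]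
      rw [ih]
      simp [List.flatMap_cons]
    · have key : ∀ (h : List Char) (t : List (List Char)),
          PySem.Chars.join ['[', '.', ']'] ((c :: h) :: t) =
            c :: PySem.Chars.join ['[', '.', ']'] (h :: t) := by
        intro h t
        cases t <;> simp [PySem.Chars.join, List.intercalate, List.intersperse]
      rw [pvSp_cons, if_neg hc, hht]
      simp only [List.headI, List.tail_cons]
      rw [key, ← hht, ih]
      simp [List.flatMap_cons, hc]

theorem defangIPaddr_eq_alt (address : String) :
    defangIPaddr address = defangIPaddr_alt address := by
  unfold defangIPaddr defangIPaddr_alt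
  have hfun : (fun (acc : List Char) (c : Char) =>
      if c == '.' then acc ++ ['[', '.', ']'] else acc ++ [c]) =
      fun acc c => acc ++ (if c == '.' then ['[', '.', ']'] else [c]) := by
    funext acc c; split <;> rfl
  rw [hfun, PySem.List.foldl_append_eq_flatMap, List.nil_append]
  have hs : PySem.Str.split? address "." =
      some (List.map String.ofList (PySem.Chars.splitOn address.toList ['.'])) := by
    simp [PySem.Str.split?, PySem.Chars.split?]
  rw [hs]
  apply String.ext
  rw [PySem.Str.toList_join]
  have hmm : List.map String.toList
      (List.map String.ofList (PySem.Chars.splitOn address.toList ['.'])) =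
      PySem.Chars.splitOn address.toList ['.'] := by
    simp [List.map_map, Function.comp_def]
  rw [hmm, pvSplitOn_eq]
  show (String.ofList _).toList = PySem.Chars.join ['[', '.', ']'] _
  rw [pvJoin_sp]
  simp [String.toList_ofList]
-- ===== VERDICT (by name: the statement is the Claim_ definition above) =====
theorem defangIPaddr_spec : Claim_equal_defangIPaddr := by
  intro address _
  exact defangIPaddr_eq_alt address
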